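-- pv_equiv track=rewrite | github.com/Cheng0639/CodeFights_Python | Chanllge-Of-The-Week/brothersInTheBar.py | brothersInTheBar
-- ===== SOURCE A (Python) =====
-- def brothersInTheBar(glasses):
--     round_counter = 0
--     index = 0
--     while index < len(glasses)-2 and len(glasses) > 2:
--         if len(set(glasses[index:index+3])) == 1:
--             del glasses[index:index+3]
--             round_counter += 1
--             index = max(0, index-2)
--         else:
--             index += 1
--
--     return round_counter
-- ===== SOURCE B (Python) =====
-- def brothersInTheBar(glasses):
--     # Single pass with a stack of (value, run_length); a run reaching 3 is
--     # popped and counted.  Note: unlike A, this does not mutate `glasses`.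
--     stack = []
--     rounds = 0
--     for x in glasses:
--         if stack and stack[-1][0] == x:
--             if stack[-1][1] == 2:
--                 stack.pop()
--                 rounds += 1
--             else:
--                 stack[-1] = (x, stack[-1][1] + 1)
--         else:
--             stack.append((x, 1))
--     return rounds
-- ===== Notes on version B (the rewrite author's own statement) =====
-- stated objective: faster
-- what changed: Replaced A's repeated rescanning of a list it keeps deleting triples from (index backs up 2 after every deletion) by a single left-to-right pass that maintains a stack of (value, run-length) pairs and counts a removal whenever a run reaches 3; B does not mutate the input list.
import Mathlib
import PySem

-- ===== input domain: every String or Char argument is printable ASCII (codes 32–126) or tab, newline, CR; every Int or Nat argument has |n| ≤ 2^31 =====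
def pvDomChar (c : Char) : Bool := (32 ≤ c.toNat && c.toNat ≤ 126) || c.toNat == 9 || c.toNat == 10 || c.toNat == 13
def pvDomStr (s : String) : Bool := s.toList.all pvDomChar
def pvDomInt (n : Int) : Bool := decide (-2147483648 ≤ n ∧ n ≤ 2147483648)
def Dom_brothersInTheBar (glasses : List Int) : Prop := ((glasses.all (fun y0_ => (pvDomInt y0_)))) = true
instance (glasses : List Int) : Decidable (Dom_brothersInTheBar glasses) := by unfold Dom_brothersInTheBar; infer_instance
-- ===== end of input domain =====

-- B replaces A's delete-and-rescan loop over a shrinking list by a single left-to-right pass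
-- with a stack of (value, run-length) pairs; A mutates its argument (del glasses[i:i+3]), B does
-- not — the equivalence proved here is about the return value only.

-- ===== PORT A =====
-- The Python `index` starts at 0 and is re-assigned only to max(0, index-2) or index+1, so it is
-- carried as a Nat (`index - 2` is exactly max(0, index-2); the loop test `index < len - 2` agrees
-- with Python's, both being false whenever len ≤ 2).  `fuel` only makes the while-loop total:
-- `glasses.length - index` strictly decreases each iteration, so `length + 1` never runs out.
def brothersInTheBar.loop (fuel : Nat) (glasses : List Int) (index : Nat) (round_counter : Int) : Int :=
  match fuel with
  | 0 => round_counter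
  | fuel + 1 =>
    if index < glasses.length - 2 ∧ 2 < glasses.length then
      if (PySem.Set.ofList (PySem.List.slice glasses (some (index : Int)) (some ((index : Int) + 3)))).length = 1 then
        -- del glasses[index:index+3]; round_counter += 1; index = max(0, index-2)
        brothersInTheBar.loop fuel (glasses.take index ++ glasses.drop (index + 3)) (index - 2) (round_counter + 1)
      else
        brothersInTheBar.loop fuel glasses (index + 1) round_counter
    else round_counter

def brothersInTheBar (glasses : List Int) : Int :=
  brothersInTheBar.loop (glasses.length + 1) glasses 0 0

-- ===== PORT B =====
-- one step of Source B's for-loop; state = (stack, rounds), stack top first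
def bbStep : (List (Int × Int) × Int) → Int → (List (Int × Int) × Int)
  | ((v, k) :: rest, c), x =>
      if v = x then
        if k = 2 then (rest, c + 1) else ((v, k + 1) :: rest, c)
      else ((x, 1) :: (v, k) :: rest, c)
  | ([], c), x => ([(x, 1)], c)

def brothersInTheBar_alt (glasses : List Int) : Int :=
  (glasses.foldl bbStep ([], 0)).2

-- ===== PRECONDITION & SPEC =====
def Spec_brothersInTheBar (glasses : List Int) (out : Int) : Prop := out = brothersInTheBar_alt glasses
instance (glasses : List Int) (out : Int) : Decidable (Spec_brothersInTheBar glasses out) := by unfold Spec_brothersInTheBar; infer_instance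

-- ===== CLAIM (what is proved, stated in full; the proofs are below) =====
def Claim_equal_brothersInTheBar : Prop := ∀ (glasses : List Int), Dom_brothersInTheBar glasses → Spec_brothersInTheBar glasses (brothersInTheBar glasses)

-- ===== LEMMAS AND PROOFS =====

-- "triple-free": no three consecutive equal elements
def TF (l : List Int) : Prop :=
  ∀ i (h : i + 2 < l.length), ¬(l[i] = l[i+1] ∧ l[i+1] = l[i+2])

-- the list of elements a stack of (value, run-length) pairs denotes
def decodeS : List (Int × Int) → List Int
  | [] => []
  | (v, k) :: rest => decodeS rest ++ List.replicate k.toNat v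

-- well-formed stack: run lengths 1 or 2, adjacent values distinct
def wfS : List (Int × Int) → Prop
  | [] => True
  | (v, k) :: rest =>
      (k = 1 ∨ k = 2) ∧ (∀ w m rest', rest = (w, m) :: rest' → w ≠ v) ∧ wfS rest

-- the stack B builds from the empty state
def sfold (l : List Int) : List (Int × Int) := (l.foldl bbStep ([], 0)).1

lemma bbStep_shift (s : List (Int × Int)) (c x : Int) :
    bbStep (s, c) x = ((bbStep (s, 0) x).1, c + (bbStep (s, 0) x).2) := by
  cases s with
  | nil => simp [bbStep]
  | cons p rest => obtain ⟨v, k⟩ := p; simp only [bbStep]; split_ifs <;> simp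

lemma TF_take {l : List Int} (h : TF l) (n : Nat) : TF (l.take n) := by
  intro i hi
  have hlen : i + 2 < l.length := lt_of_lt_of_le hi (by simp)
  simpa [List.getElem_take] using h i hlen

lemma TF_prefix {l m : List Int} (h : TF (l ++ m)) : TF l := by
  have := TF_take h l.length
  simpa using this

lemma no_triple_suffix (p : List Int) (a : Int) : ¬ TF (p ++ [a, a, a]) := by
  intro h
  have hlen : p.length + 2 < (p ++ [a, a, a]).length := by simp
  have h0 : (p ++ [a, a, a])[p.length]'(by omega) = a := by
    rw [List.getElem_append_right (by omega)]; simp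
  have h1 : (p ++ [a, a, a])[p.length + 1]'(by omega) = a := by
    rw [List.getElem_append_right (by omega)]; simp
  have h2 : (p ++ [a, a, a])[p.length + 2]'(by omega) = a := by
    rw [List.getElem_append_right (by omega)]; simp
  exact h p.length hlen ⟨by rw [h0, h1], by rw [h1, h2]⟩

lemma stack_char : ∀ l : List Int, TF l →
    wfS (sfold l) ∧ decodeS (sfold l) = l ∧ (l.foldl bbStep ([], 0)).2 = 0 := by
  intro l
  induction l using List.reverseRecOn with
  | nil => intro _; exact ⟨trivial, rfl, rfl⟩
  | append_singleton l x ih =>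
    intro h
    obtain ⟨hwf, hdec, hc⟩ := ih (TF_prefix h)
    have hfold : (l ++ [x]).foldl bbStep ([], 0) = bbStep (sfold l, 0) x := by
      rw [List.foldl_append]
      have : l.foldl bbStep ([], 0) = (sfold l, 0) := by
        rw [Prod.ext_iff]; exact ⟨rfl, hc⟩
      rw [this]; rfl
    cases hS : sfold l with
    | nil =>
      have hl : l = [] := by rw [← hdec, hS]; rfl
      subst hl
      refine ⟨?_, ?_, ?_⟩ <;> simp [sfold, bbStep, wfS, decodeS]
    | cons p rest =>
      obtain ⟨v, k⟩ := p
      rw [hS] at hwf hdec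
      obtain ⟨hk, hadj, hwfr⟩ := hwf
      by_cases hvx : v = x
      · rcases hk with hk | hk
        · -- k = 1 : extend the run to 2
          subst hk hvx
          have hstep : bbStep ((v, 1) :: rest, 0) v = ((v, 2) :: rest, 0) := by
            simp [bbStep]
          refine ⟨?_, ?_, ?_⟩
          · show wfS (sfold (l ++ [v]))
            rw [sfold, hfold, hS, hstep]
            exact ⟨Or.inr rfl, hadj, hwfr⟩
          · show decodeS (sfold (l ++ [v])) = l ++ [v]
            rw [sfold, hfold, hS, hstep]
            show decodeS rest ++ List.replicate (2:Int).toNat v = l ++ [v]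
            rw [← hdec]
            show decodeS rest ++ [v, v] = (decodeS rest ++ List.replicate (1:Int).toNat v) ++ [v]
            simp
          · rw [hfold, hS, hstep]
        · -- k = 2 and v = x : would be a triple, contradicting TF (l ++ [x])
          exfalso
          subst hk hvx
          have : l ++ [v] = decodeS rest ++ [v, v, v] := by
            rw [← hdec]
            show (decodeS rest ++ List.replicate (2:Int).toNat v) ++ [v] = _
            simp
          rw [this] at h
          exact no_triple_suffix _ _ h
      · -- push a new run
        have hstep : bbStep ((v, k) :: rest, 0) x = ((x, 1) :: (v, k) :: rest, 0) := by
          simp [bbStep, hvx]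
        refine ⟨?_, ?_, ?_⟩
        · show wfS (sfold (l ++ [x]))
          rw [sfold, hfold, hS, hstep]
          exact ⟨Or.inl rfl, fun w m r' hr => by cases hr; exact hvx, ⟨hk, hadj, hwfr⟩⟩
        · show decodeS (sfold (l ++ [x])) = l ++ [x]
          rw [sfold, hfold, hS, hstep]
          show decodeS ((v,k)::rest) ++ List.replicate (1:Int).toNat x = l ++ [x]
          rw [hdec]; simp
        · rw [hfold, hS, hstep]

lemma step_one {l : List Int} {x : Int} (h : TF (l ++ [x])) (c : Int) :
    bbStep (sfold l, c) x = (sfold (l ++ [x]), c) := by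
  obtain ⟨_, _, hc⟩ := stack_char l (TF_prefix h)
  obtain ⟨_, _, hc'⟩ := stack_char (l ++ [x]) h
  have hfold : (l ++ [x]).foldl bbStep ([], 0) = bbStep (sfold l, 0) x := by
    rw [List.foldl_append]
    have : l.foldl bbStep ([], 0) = (sfold l, 0) := by rw [Prod.ext_iff]; exact ⟨rfl, hc⟩
    rw [this]; rfl
  have hz : (bbStep (sfold l, 0) x).2 = 0 := by rw [← hfold]; exact hc'
  have hs : (bbStep (sfold l, 0) x).1 = sfold (l ++ [x]) := by rw [← hfold]; rfl
  rw [bbStep_shift, hz, hs, add_zero]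

lemma sfold_append : ∀ (m l : List Int) (c : Int), TF (l ++ m) →
    List.foldl bbStep (sfold l, c) m = (sfold (l ++ m), c) := by
  intro m
  induction m with
  | nil => intro l c _; simp
  | cons x m ih =>
    intro l c h
    have hassoc : l ++ x :: m = (l ++ [x]) ++ m := by simp
    rw [hassoc] at h ⊢
    have h1 : TF (l ++ [x]) := TF_prefix h
    calc List.foldl bbStep (sfold l, c) (x :: m)
        = List.foldl bbStep (bbStep (sfold l, c) x) m := rfl
      _ = List.foldl bbStep (sfold (l ++ [x]), c) m := by rw [step_one h1]
      _ = (sfold ((l ++ [x]) ++ m), c) := ih _ c h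

lemma decode_getLast {S : List (Int × Int)} (hwf : wfS S) {v k rest}
    (hS : S = (v, k) :: rest) : (decodeS S).getLast? = some v := by
  subst hS
  obtain ⟨hk, -, -⟩ := hwf
  have hpos : 0 < k.toNat := by rcases hk with h | h <;> simp [h]
  show (decodeS rest ++ List.replicate k.toNat v).getLast? = some v
  cases hn : k.toNat with
  | zero => omega
  | succ n =>
    rw [List.replicate_succ', ← List.append_assoc]
    simp

lemma set_three (a b c : Int) : (PySem.Set.ofList [a,b,c]).length = 1 ↔ (a = b ∧ b = c) := by
  by_cases h1 : b = a <;> by_cases h2 : c = a <;> by_cases h3 : c = b <;>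
    simp [PySem.Set.ofList, PySem.Set.add, PySem.Set.contains, h1, h2, h3] <;> omega

lemma drop_take_three (g : List Int) (i : Nat) (h : i + 2 < g.length) :
    (g.drop i).take 3 = [g[i], g[i+1], g[i+2]] := by
  rw [List.drop_eq_getElem_cons (by omega), List.drop_eq_getElem_cons (i := i+1) (by omega),
      List.drop_eq_getElem_cons (i := i+2) (by omega)]
  rfl

lemma slice_three (g : List Int) (i : Nat) :
    PySem.List.slice g (some (i:Int)) (some ((i:Int)+3)) = (g.drop i).take 3 := by
  have : ((i:Int)+3) = (((i+3:Nat)):Int) := by push_cast; ring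
  rw [this, PySem.List.slice_natCast]
  congr 1; omega

lemma cond_iff (g : List Int) (i : Nat) (h : i + 2 < g.length) :
    (PySem.Set.ofList (PySem.List.slice g (some (i:Int)) (some ((i:Int)+3)))).length = 1 ↔
      (g[i] = g[i+1] ∧ g[i+1] = g[i+2]) := by
  rw [slice_three, drop_take_three g i h, set_three]

lemma TF_take_succ {g : List Int} {n : Nat} (h : TF (g.take (n + 2)))
    (hn : ∀ (hl : n + 2 < g.length),
      ¬(g[n]'(by omega) = g[n+1]'(by omega) ∧ g[n+1]'(by omega) = g[n+2]'hl)) :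
    TF (g.take (n + 3)) := by
  intro i hi
  have hlen : i + 2 < g.length := by
    have := hi; simp [List.length_take] at this; omega
  have hin3 : i + 2 < n + 3 := by
    have := hi; simp [List.length_take] at this; omega
  simp only [List.getElem_take]
  rcases Nat.lt_or_ge i n with hlt | hge
  · have : i + 2 < (g.take (n + 2)).length := by simp [List.length_take]; omega
    have := h i this
    simpa [List.getElem_take] using this
  · have hieq : i = n := by omega
    subst hieq
    exact hn hlen


lemma TF_take_le {g : List Int} {m k : Nat} (h : TF (g.take m)) (hk : k ≤ m) : TF (g.take k) := by
  have := TF_take h k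
  rwa [List.take_take, min_eq_left hk] at this

lemma TF_short {l : List Int} (h : l.length ≤ 2) : TF l := by
  intro i hi; omega

lemma loop_unfold (fuel : Nat) (g : List Int) (i : Nat) (c : Int) :
    brothersInTheBar.loop (fuel + 1) g i c =
      if i < g.length - 2 ∧ 2 < g.length then
        if (PySem.Set.ofList (PySem.List.slice g (some (i : Int)) (some ((i : Int) + 3)))).length = 1 then
          brothersInTheBar.loop fuel (g.take i ++ g.drop (i + 3)) (i - 2) (c + 1)
        else brothersInTheBar.loop fuel g (i + 1) c
      else c := rfl

lemma main : ∀ (fuel : Nat) (g : List Int) (i : Nat) (c : Int), g.length - i < fuel →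
    i ≤ g.length → TF (g.take (i+2)) →
    brothersInTheBar.loop fuel g i c = (List.foldl bbStep (sfold (g.take i), c) (g.drop i)).2 := by
  intro fuel
  induction fuel with
  | zero => intro g i c hf; omega
  | succ fuel ih =>
    intro g i c hf hle hTF
    rw [loop_unfold]
    by_cases hcond : i < g.length - 2 ∧ 2 < g.length
    · by_cases hset : (PySem.Set.ofList (PySem.List.slice g (some (i : Int)) (some ((i : Int) + 3)))).length = 1
      · rw [if_pos hcond, if_pos hset]
        have hi2 : i + 2 < g.length := by omega
        obtain ⟨ha, hb⟩ := (cond_iff g i hi2).mp hset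
        have htakei : (g.take i).length = i := by simp; omega
        have hgTFi : TF (g.take i) := TF_take_le hTF (by omega)
        have hTF' : TF ((g.take i ++ g.drop (i+3)).take (i - 2 + 2)) := by
          rcases Nat.lt_or_ge i 2 with h2 | h2
          · exact TF_short (by simp [List.length_take]; omega)
          · have he : i - 2 + 2 = i := by omega
            rw [he, List.take_left' htakei]
            exact hgTFi
        rw [ih _ _ _ (by simp [List.length_take, List.length_drop]; omega)
            (by simp [List.length_take, List.length_drop]; omega) hTF']
        have hd : g.drop i = g[i] :: g[i+1] :: g[i+2] :: g.drop (i+3) := by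
          rw [List.drop_eq_getElem_cons (show i < g.length by omega),
              List.drop_eq_getElem_cons (show i+1 < g.length by omega),
              List.drop_eq_getElem_cons (show i+2 < g.length by omega)]
        obtain ⟨hwf, hdec, -⟩ := stack_char (g.take i) hgTFi
        have hpush : bbStep (sfold (g.take i), c) (g[i]'(by omega)) =
            ((g[i]'(by omega), 1) :: sfold (g.take i), c) := by
          cases hSc : sfold (g.take i) with
          | nil => simp [bbStep]
          | cons p rest =>
            obtain ⟨v, k⟩ := p
            have hlast : (g.take i).getLast? = some v := by
              have := decode_getLast hwf hSc; rwa [hdec] at this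
            have hi1 : 1 ≤ i := by
              by_contra h0
              have : i = 0 := by omega
              subst this; simp at hlast
            have hvl : v = g[i-1]'(by omega) := by
              have h2 : (g.take i).getLast? = some (g[i-1]'(by omega)) := by
                rw [List.getLast?_eq_getElem?, htakei,
                    List.getElem?_take_of_lt (by omega),
                    List.getElem?_eq_getElem (by omega)]
              rw [h2] at hlast
              exact (Option.some_inj.mp hlast).symm
            have hne : ¬ v = g[i]'(by omega) := by
              have ht := hTF (i-1) (by simp [List.length_take]; omega)
              simp only [List.getElem_take] at ht
              simp only [show i-1+1 = i from by omega, show i-1+2 = i+1 from by omega] at ht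
              rw [hvl]
              intro hcontr
              exact ht ⟨hcontr, ha⟩
            simp [bbStep, hne]
        rw [hd, ← hb, ← ha, List.foldl_cons, List.foldl_cons, List.foldl_cons, hpush]
        have hstep2 : bbStep ((g[i]'(by omega), 1) :: sfold (g.take i), c) (g[i]'(by omega)) =
            ((g[i]'(by omega), 2) :: sfold (g.take i), c) := by norm_num [bbStep]
        have hstep3 : bbStep ((g[i]'(by omega), 2) :: sfold (g.take i), c) (g[i]'(by omega)) =
            (sfold (g.take i), c + 1) := by simp [bbStep]
        rw [hstep2, hstep3]
        have hGt : (g.take i ++ g.drop (i+3)).take (i-2) = g.take (i-2) := by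
          rw [List.take_append_of_le_length (by omega), List.take_take,
              min_eq_left (by omega)]
        have hGd : (g.take i ++ g.drop (i+3)).drop (i-2) =
            (g.take i).drop (i-2) ++ g.drop (i+3) := by
          rw [List.drop_append_of_le_length (by omega)]
        have hsplit : g.take (i-2) ++ (g.take i).drop (i-2) = g.take i := by
          have : g.take (i-2) = (g.take i).take (i-2) := by
            rw [List.take_take, min_eq_left (by omega)]
          rw [this, List.take_append_drop]
        rw [hGt, hGd, List.foldl_append]
        have hinner : List.foldl bbStep (sfold (g.take (i-2)), c+1) ((g.take i).drop (i-2)) =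
            (sfold (g.take i), c+1) := by
          have := sfold_append ((g.take i).drop (i-2)) (g.take (i-2)) (c+1)
            (by rw [hsplit]; exact hgTFi)
          rw [this, hsplit]
        rw [hinner]
      · rw [if_pos hcond, if_neg hset]
        have hi2 : i + 2 < g.length := by omega
        have hnt : ¬(g[i] = g[i+1] ∧ g[i+1] = g[i+2]) := by
          rw [← cond_iff g i hi2]; exact hset
        have hTF' : TF (g.take (i + 1 + 2)) := by
          refine TF_take_succ hTF ?_
          intro hl; exact hnt
        rw [ih _ _ _ (by omega) (by omega) hTF']
        have htk : g.take i ++ [g[i]] = g.take (i + 1) := by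
          rw [List.take_succ, List.getElem?_eq_getElem (show i < g.length by omega)]
          rfl
        have hTFc : TF (g.take i ++ [g[i]]) := by
          rw [htk]; exact TF_take_le hTF' (by omega)
        rw [List.drop_eq_getElem_cons (show i < g.length by omega), List.foldl_cons,
            step_one hTFc c, htk]
    · rw [if_neg hcond]
      have hlen : g.length ≤ i + 2 := by
        rcases Nat.lt_or_ge 2 g.length with h | h
        · push_neg at hcond; omega
        · omega
      have hg : g.take (i + 2) = g := List.take_of_length_le hlen
      rw [hg] at hTF
      have := sfold_append (g.drop i) (g.take i) c (by rw [List.take_append_drop]; exact hTF)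
      rw [this]

-- ===== VERDICT (by name: the statement is the Claim_ definition above) =====
theorem brothersInTheBar_spec : Claim_equal_brothersInTheBar := by
  intro g _
  show brothersInTheBar g = brothersInTheBar_alt g
  have h := main (g.length + 1) g 0 0 (by omega) (by omega) (TF_short (by simp))
  simpa [brothersInTheBar, brothersInTheBar_alt, sfold] using h
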